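-- pv_equiv track=rewrite | github.com/janismdhanbad/paper_explorer | src/utils.py | arxiv_abstract_match
-- ===== SOURCE A (Python) =====
-- def arxiv_abstract_match(query_abstract, target_abstract):
--     list_query = query_abstract.split(" ")
--     list_target = target_abstract.split(" ")
--     list_query = [f.lower() for f in list_query]
--     list_target = [f.lower() for f in list_target]
--
--     list_inter = list(set(list_query) & set(list_target))
--     if bool(list_inter):
--         return True
--     else:
--         return False
-- ===== SOURCE B (Python) =====
-- def arxiv_abstract_match(query_abstract, target_abstract):
--     a = sorted(w.lower() for w in query_abstract.split(" "))
--     b = sorted(w.lower() for w in target_abstract.split(" "))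
--     i, j = 0, 0
--     while i < len(a) and j < len(b):
--         if a[i] == b[j]:
--             return True
--         if a[i] < b[j]:
--             i += 1
--         else:
--             j += 1
--     return False
-- ===== Notes on version B (the rewrite author's own statement) =====
-- stated objective: alternative
-- what changed: B sorts the two lowercased word lists and finds a shared word by a two-pointer merge scan, instead of A's hash-set intersection; no sets are built at all.
import Mathlib
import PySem

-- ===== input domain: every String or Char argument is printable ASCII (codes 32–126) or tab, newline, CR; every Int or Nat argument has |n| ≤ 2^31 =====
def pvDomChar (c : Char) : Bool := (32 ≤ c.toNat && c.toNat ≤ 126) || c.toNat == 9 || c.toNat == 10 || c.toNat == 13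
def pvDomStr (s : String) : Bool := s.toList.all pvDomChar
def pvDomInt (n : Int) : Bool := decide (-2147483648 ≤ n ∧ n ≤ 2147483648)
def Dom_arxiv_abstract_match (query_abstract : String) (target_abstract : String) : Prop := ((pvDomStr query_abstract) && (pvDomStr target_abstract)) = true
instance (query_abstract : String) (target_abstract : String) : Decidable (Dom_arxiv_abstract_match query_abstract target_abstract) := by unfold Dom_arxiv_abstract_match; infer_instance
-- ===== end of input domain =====

-- B sorts both lowercased word lists and finds a shared word by a two-pointer merge scan
-- (no sets at all), instead of A's hash-set intersection; an alternative algorithm of similar cost.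


-- s.split(" "): sep is the nonempty literal " ", so PySem.Str.split? is always `some` and getD [] is exact
def pvSplitSp (s : String) : List String := (PySem.Str.split? s " ").getD []

-- ===== PORT A =====
def arxiv_abstract_match (query_abstract : String) (target_abstract : String) : Bool :=
  let list_query := pvSplitSp query_abstract
  let list_target := pvSplitSp target_abstract
  let list_query := list_query.map PySem.Str.lower
  let list_target := list_target.map PySem.Str.lower
  let list_inter := PySem.Set.inter (PySem.Set.ofList list_query) (PySem.Set.ofList list_target)
  -- bool(list_inter): a list is truthy iff nonempty; 'list(...)' only re-orders, truthiness is order-independent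
  if list_inter.isEmpty = false then true else false

-- ===== PORT B =====
-- the two-pointer 'while i < len(a) and j < len(b)' scan of Source B, as structural recursion
-- on the suffixes a[i:], b[j:] (advancing a pointer = dropping the head of that suffix)
def pvMergeScan : List String → List String → Bool
  | [], _ => false
  | _ :: _, [] => false
  | x :: xs, y :: ys =>
    if x = y then true
    else if x < y then pvMergeScan xs (y :: ys)
    else pvMergeScan (x :: xs) ys
termination_by a b => a.length + b.length

def arxiv_abstract_match_alt (query_abstract : String) (target_abstract : String) : Bool :=
  let a := PySem.List.sorted ((pvSplitSp query_abstract).map PySem.Str.lower) (fun x => x) false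
  let b := PySem.List.sorted ((pvSplitSp target_abstract).map PySem.Str.lower) (fun x => x) false
  pvMergeScan a b

-- ===== PRECONDITION & SPEC =====
def Spec_arxiv_abstract_match (query_abstract : String) (target_abstract : String) (out : Bool) : Prop := out = arxiv_abstract_match_alt query_abstract target_abstract
instance (query_abstract : String) (target_abstract : String) (out : Bool) : Decidable (Spec_arxiv_abstract_match query_abstract target_abstract out) := by unfold Spec_arxiv_abstract_match; infer_instance

-- ===== CLAIM =====
def Claim_equal_arxiv_abstract_match : Prop := ∀ (query_abstract : String) (target_abstract : String), Dom_arxiv_abstract_match query_abstract target_abstract → Spec_arxiv_abstract_match query_abstract target_abstract (arxiv_abstract_match query_abstract target_abstract)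

-- ===== LEMMAS AND PROOFS =====
-- the merge scan on two ≤-sorted lists detects exactly whether they share an element
lemma pvMergeScan_iff (a b : List String)
    (ha : a.Pairwise (· ≤ ·)) (hb : b.Pairwise (· ≤ ·)) :
    pvMergeScan a b = true ↔ ∃ z, z ∈ a ∧ z ∈ b := by
  induction a generalizing b with
  | nil => simp [pvMergeScan]
  | cons x xs iha =>
    induction b with
    | nil => simp [pvMergeScan]
    | cons y ys ihb =>
      rw [pvMergeScan]
      by_cases hxy : x = y
      · subst hxy
        simp
      · simp only [if_neg hxy]
        rcases List.pairwise_cons.mp ha with ⟨hxall, hxs⟩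
        rcases List.pairwise_cons.mp hb with ⟨hyall, hys⟩
        by_cases hlt : x < y
        · simp only [if_pos hlt]
          rw [iha (y :: ys) hxs (List.pairwise_cons.mpr ⟨hyall, hys⟩)]
          constructor
          · rintro ⟨z, hz1, hz2⟩; exact ⟨z, List.mem_cons_of_mem _ hz1, hz2⟩
          · rintro ⟨z, hz1, hz2⟩
            rcases List.mem_cons.mp hz1 with rfl | hz1
            · -- z = x common with y :: ys: impossible, every element of y::ys is ≥ y > x
              rcases List.mem_cons.mp hz2 with rfl | hz2
              · exact absurd rfl hxy
              · exact absurd (lt_of_lt_of_le hlt (hyall _ hz2)) (lt_irrefl _)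
            · exact ⟨z, hz1, hz2⟩
        · have hyx : y < x := lt_of_le_of_ne (not_lt.mp hlt) (fun h => hxy h.symm)
          simp only [if_neg hlt]
          rw [ihb hys]
          constructor
          · rintro ⟨z, hz1, hz2⟩; exact ⟨z, hz1, List.mem_cons_of_mem _ hz2⟩
          · rintro ⟨z, hz1, hz2⟩
            rcases List.mem_cons.mp hz2 with rfl | hz2
            · rcases List.mem_cons.mp hz1 with rfl | hz1
              · exact absurd rfl hxy
              · exact absurd (lt_of_lt_of_le hyx (hxall _ hz1)) (lt_irrefl _)
            · exact ⟨z, hz1, hz2⟩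

lemma pvTruthy_iff {α : Type} (l : List α) :
    (if l.isEmpty = false then true else false) = true ↔ ∃ y, y ∈ l := by
  cases l <;> simp

lemma portA_iff (q t : String) :
    arxiv_abstract_match q t = true ↔
      ∃ y, y ∈ (pvSplitSp q).map PySem.Str.lower ∧
           y ∈ (pvSplitSp t).map PySem.Str.lower := by
  unfold arxiv_abstract_match
  simp only [pvTruthy_iff]
  constructor
  · rintro ⟨y, hy⟩
    rw [PySem.Set.mem_inter, PySem.Set.mem_ofList, PySem.Set.mem_ofList] at hy
    exact ⟨y, hy⟩
  · rintro ⟨y, h1, h2⟩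
    exact ⟨y, (PySem.Set.mem_inter _ _ _).mpr
      ⟨(PySem.Set.mem_ofList _ _).mpr h1, (PySem.Set.mem_ofList _ _).mpr h2⟩⟩

lemma portB_iff (q t : String) :
    arxiv_abstract_match_alt q t = true ↔
      ∃ y, y ∈ (pvSplitSp q).map PySem.Str.lower ∧
           y ∈ (pvSplitSp t).map PySem.Str.lower := by
  unfold arxiv_abstract_match_alt
  rw [pvMergeScan_iff _ _ (PySem.List.sorted_pairwise _ _) (PySem.List.sorted_pairwise _ _)]
  simp [PySem.List.mem_sorted]

-- ===== VERDICT =====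
theorem arxiv_abstract_match_spec : Claim_equal_arxiv_abstract_match := by
  intro q t _
  unfold Spec_arxiv_abstract_match
  have h := (portA_iff q t).trans (portB_iff q t).symm
  rcases hA : arxiv_abstract_match q t with _ | _ <;>
    rcases hB : arxiv_abstract_match_alt q t with _ | _ <;>
    simp_all
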